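-- pv_equiv track=rewrite | github.com/Semert/Algorithms-Data-Structures | HackerRank/E - The Hurdle Race.py | hurdleRace
-- ===== SOURCE A (Python) =====
-- def hurdleRace(k, height):
--     jump = []
--     for i in height:
--         if(i>k):
--             jump.append(i)
--     if(len(jump)==0):
--         return 0
--     return max(jump)-k
-- ===== SOURCE B (Python) =====
-- def hurdleRace(k, height):
--     need = 0
--     for h in height:
--         d = h - k
--         if d > need:
--             need = d
--     return need
-- ===== Notes on version B (the rewrite author's own statement) =====
-- stated objective: simpler
-- what changed: B is a single-pass accumulator that keeps the largest needed boost max(h-k, 0) seen so far, replacing A's two-phase build-a-filtered-list-then-rescan-with-max() structure; no intermediate list and no builtin max() remain.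
import Mathlib
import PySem

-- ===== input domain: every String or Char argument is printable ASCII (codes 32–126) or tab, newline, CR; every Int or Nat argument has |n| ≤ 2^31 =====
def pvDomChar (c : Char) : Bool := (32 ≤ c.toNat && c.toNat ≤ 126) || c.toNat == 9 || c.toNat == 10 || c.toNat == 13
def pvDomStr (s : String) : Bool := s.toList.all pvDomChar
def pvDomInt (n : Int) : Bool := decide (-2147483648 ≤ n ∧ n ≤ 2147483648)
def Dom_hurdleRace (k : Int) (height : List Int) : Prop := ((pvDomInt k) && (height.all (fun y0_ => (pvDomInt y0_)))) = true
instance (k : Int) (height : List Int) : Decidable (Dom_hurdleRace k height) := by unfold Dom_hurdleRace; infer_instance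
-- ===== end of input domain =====

-- B replaces A's build-filtered-list-then-max() two-phase structure with a single-pass
-- accumulator of the largest needed boost (simpler: no intermediate list, no builtin max).


-- ===== PORT A =====
def hurdleRace (k : Int) (height : List Int) : Int :=
  let jump := height.foldl (fun acc i => if i > k then acc ++ [i] else acc) []
  if jump.length == 0 then 0
  else ((PySem.List.max? jump (fun x => x)).getD 0) - k

-- ===== PORT B =====
def hurdleRace_alt (k : Int) (height : List Int) : Int :=
  height.foldl (fun need h => if h - k > need then h - k else need) 0

-- ===== PRECONDITION & SPEC =====
def Spec_hurdleRace (k : Int) (height : List Int) (out : Int) : Prop := out = hurdleRace_alt k height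
instance (k : Int) (height : List Int) (out : Int) : Decidable (Spec_hurdleRace k height out) := by unfold Spec_hurdleRace; infer_instance

-- ===== CLAIM (what is proved, stated in full; the proofs are below) =====
def Claim_equal_hurdleRace : Prop := ∀ (k : Int) (height : List Int), Dom_hurdleRace k height → Spec_hurdleRace k height (hurdleRace k height)

-- ===== LEMMAS AND PROOFS =====

-- B's fold is the least upper bound of its start and all deficits h - k.
theorem pv_foldl_le_iff (k x : Int) (l : List Int) : ∀ (a : Int),
    (l.foldl (fun need h => if h - k > need then h - k else need) a ≤ x)
      ↔ (a ≤ x ∧ ∀ h ∈ l, h - k ≤ x) := by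
  induction l with
  | nil => intro a; simp
  | cons h t ih =>
    intro a
    simp only [List.foldl_cons, List.mem_cons]
    rw [ih]
    by_cases hc : h - k > a
    · rw [if_pos hc]
      constructor
      · rintro ⟨h1, h2⟩
        exact ⟨by omega, fun y hy => hy.elim (fun e => e ▸ h1) (h2 y)⟩
      · rintro ⟨h1, h2⟩
        exact ⟨h2 h (Or.inl rfl), fun y hy => h2 y (Or.inr hy)⟩
    · rw [if_neg hc]
      constructor
      · rintro ⟨h1, h2⟩
        exact ⟨h1, fun y hy => hy.elim (fun e => e ▸ by omega) (h2 y)⟩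
      · rintro ⟨h1, h2⟩
        exact ⟨h1, fun y hy => h2 y (Or.inr hy)⟩

-- ===== VERDICT (by name: the statement is the Claim_ definition above) =====
theorem hurdleRace_spec : Claim_equal_hurdleRace := by
  intro k height _
  unfold Spec_hurdleRace hurdleRace hurdleRace_alt
  have hf : height.foldl (fun acc i => if i > k then acc ++ [i] else acc) []
      = [] ++ height.filter (fun i => decide (i > k)) :=
    PySem.List.foldl_append_ite_eq_filter (fun i => i > k) height []
  simp only [List.nil_append] at hf
  rw [hf]
  -- facts about B's fold F
  set F := height.foldl (fun need h => if h - k > need then h - k else need) 0 with hF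
  have hself := (pv_foldl_le_iff k F height 0).mp (le_of_eq hF.symm)
  have hF0 : 0 ≤ F := hself.1
  have hFub : ∀ h ∈ height, h - k ≤ F := hself.2
  by_cases hemp : height.filter (fun i => decide (i > k)) = []
  · -- no element exceeds k: A returns 0 and F = 0
    rw [hemp]
    simp only [List.length_nil]
    rw [if_pos (by decide)]
    have hle : F ≤ 0 := (pv_foldl_le_iff k 0 height 0).mpr
      ⟨le_refl 0, fun h hh => by
        have := List.filter_eq_nil_iff.mp hemp h hh
        simp at this; omega⟩
    omega
  · -- some element exceeds k: A returns (max of filtered) - k, and F equals it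
    obtain ⟨mf, hmf⟩ : ∃ mf,
        PySem.List.max? (height.filter (fun i => decide (i > k))) (fun x => x) = some mf := by
      cases hmx : PySem.List.max? (height.filter (fun i => decide (i > k))) (fun x => x) with
      | none => exact absurd ((Iff.mp (PySem.List.max?_eq_none_iff _ _) hmx)) hemp
      | some mf => exact ⟨mf, rfl⟩
    have hlen : ((height.filter (fun i => decide (i > k))).length == 0) = false := by
      simp [List.length_eq_zero_iff, hemp]
    rw [if_neg (by simp [hlen]), hmf]
    simp only [Option.getD_some]
    have hmffil := List.mem_filter.mp (PySem.List.max?_mem hmf)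
    have hmfgt : k < mf := by simpa using hmffil.2
    -- F ≤ mf - k
    have hFle : F ≤ mf - k := (pv_foldl_le_iff k (mf - k) height 0).mpr
      ⟨by omega, fun h hh => by
        by_cases hgt : h > k
        · have : h ∈ height.filter (fun i => decide (i > k)) :=
            List.mem_filter.mpr ⟨hh, by simpa using hgt⟩
          have := PySem.List.max?_isMax hmf h this
          omega
        · omega⟩
    -- mf - k ≤ F
    have hge : mf - k ≤ F := hFub mf hmffil.1
    omega
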